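-- pv_equiv track=rewrite | github.com/Francisco1583/rockingScience | rocket_app/callbacks/analytics_overview.py | _label_from_column
-- ===== SOURCE A (Python) =====
-- def _label_from_column(column):
--     units = {
--         "_mps": "m/s",
--         "_m": "m",
--         "_c": "C",
--         "_hpa": "hPa",
--         "_deg": "deg",
--     }
--     for suffix, unit in units.items():
--         if column.lower().endswith(suffix):
--             return f"{column.replace('_', ' ').title()} ({unit})"
--     return column.replace("_", " ").title()
-- ===== SOURCE B (Python) =====
-- def _label_from_column(column):
--     units = {"mps": "m/s", "m": "m", "c": "C", "hpa": "hPa", "deg": "deg"}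
--     base = column.replace("_", " ").title()
--     parts = column.lower().rsplit("_", 1)
--     if len(parts) == 2:
--         unit = units.get(parts[1])
--         if unit is not None:
--             return f"{base} ({unit})"
--     return base
-- ===== Notes on version B (the rewrite author's own statement) =====
-- stated objective: idiomatic
-- what changed: Replaces A's loop over five underscore-prefixed suffixes tested with endswith by a single right-split at the last underscore extracting the trailing token once, followed by one dict lookup of the bare token.
import Mathlib
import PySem

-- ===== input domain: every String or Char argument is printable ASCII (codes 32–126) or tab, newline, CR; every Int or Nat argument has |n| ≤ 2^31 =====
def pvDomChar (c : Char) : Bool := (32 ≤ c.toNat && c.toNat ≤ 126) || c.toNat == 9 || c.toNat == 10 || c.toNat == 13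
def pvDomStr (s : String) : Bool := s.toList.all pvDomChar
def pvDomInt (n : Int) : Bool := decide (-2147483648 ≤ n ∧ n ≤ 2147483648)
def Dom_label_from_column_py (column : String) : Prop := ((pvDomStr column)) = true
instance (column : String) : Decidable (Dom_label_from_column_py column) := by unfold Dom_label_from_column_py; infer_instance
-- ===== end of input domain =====

-- B replaces A's five-iteration endswith scan by one rsplit('_', 1) plus a dict lookup of the bare trailing token (idiomatic; same cost).

-- hand port of str.title(): a letter preceded by a letter is lowercased, otherwise uppercased; exact on ASCII
def pyTitle : List Char → Bool → List Char
  | [], _ => []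
  | c :: cs, prev =>
      (if PySem.Chars.isalpha c then (if prev then PySem.Chars.lowerChar c else PySem.Chars.upperChar c) else c)
        :: pyTitle cs (PySem.Chars.isalpha c)

def titleStr (s : String) : String := String.ofList (pyTitle s.toList false)

-- ===== PORT A =====
def aLoop (column : String) : List (String × String) → String
  | [] => titleStr (PySem.Str.replace column "_" " ")
  | (suffix, unit) :: rest =>
      if PySem.Str.endswith (PySem.Str.lower column) suffix then
        titleStr (PySem.Str.replace column "_" " ") ++ " (" ++ unit ++ ")"
      else aLoop column rest

def label_from_column_py (column : String) : String :=
  aLoop column [("_mps", "m/s"), ("_m", "m"), ("_c", "C"), ("_hpa", "hPa"), ("_deg", "deg")]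

-- ===== PORT B =====
-- the suffix after the LAST occurrence of sep, none if sep is absent (helper for rsplit(sep, 1))
def tailAfterLast (sep : Char) : List Char → Option (List Char)
  | [] => none
  | c :: cs =>
      match tailAfterLast sep cs with
      | some t => some t
      | none => if c = sep then some cs else none

-- hand port of str.rsplit(sep, 1) for a one-char sep; exact
def pyRsplit1 (cs : List Char) (sep : Char) : List (List Char) :=
  match tailAfterLast sep cs with
  | none => [cs]
  | some t => [cs.take (cs.length - (t.length + 1)), t]

def label_from_column_py_alt (column : String) : String :=
  let units : PySem.Dict String String :=
    PySem.Dict.ofList [("mps", "m/s"), ("m", "m"), ("c", "C"), ("hpa", "hPa"), ("deg", "deg")]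
  let base := titleStr (PySem.Str.replace column "_" " ")
  let parts := pyRsplit1 (PySem.Str.lower column).toList '_'
  if parts.length = 2 then
    match units.get? (String.ofList (parts.getD 1 [])) with
    | some unit => base ++ " (" ++ unit ++ ")"
    | none => base
  else base

-- ===== PRECONDITION & SPEC =====
def Spec_label_from_column_py (column : String) (out : String) : Prop := out = label_from_column_py_alt column
instance (column : String) (out : String) : Decidable (Spec_label_from_column_py column out) := by unfold Spec_label_from_column_py; infer_instance

-- ===== CLAIM (what is proved, stated in full; the proofs are below) =====
def Claim_equal_label_from_column_py : Prop := ∀ (column : String), Dom_label_from_column_py column → Spec_label_from_column_py column (label_from_column_py column)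

-- ===== LEMMAS AND PROOFS =====

theorem tailAfterLast_none_iff (sep : Char) (cs : List Char) :
    tailAfterLast sep cs = none ↔ sep ∉ cs := by
  induction cs with
  | nil => simp [tailAfterLast]
  | cons c cs ih =>
    simp only [tailAfterLast]
    cases h : tailAfterLast sep cs with
    | some t =>
      show some t = none ↔ sep ∉ c :: cs
      constructor
      · intro hif; exact absurd hif (by simp)
      · intro hn
        have hnone := ih.mpr (fun hm => hn (List.mem_cons_of_mem _ hm))
        exact absurd (h.symm.trans hnone) (by simp)
    | none =>
      show (if c = sep then some cs else none) = none ↔ sep ∉ c :: cs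
      constructor
      · intro hif
        split_ifs at hif with hc
        intro hm
        rcases List.mem_cons.mp hm with he | hm'
        · exact hc he.symm
        · exact (ih.mp h) hm'
      · intro hn
        rw [if_neg (fun he : c = sep => hn (he ▸ List.mem_cons_self))]

-- sep :: tok (with sep ∉ tok) is a suffix of cs exactly when tok is the tail after the LAST sep of cs
theorem suffix_iff_tailAfterLast (sep : Char) (cs t tok : List Char)
    (hta : tailAfterLast sep cs = some t) (htok : sep ∉ tok) :
    (sep :: tok <:+ cs) ↔ tok = t := by
  induction cs generalizing t with
  | nil => simp [tailAfterLast] at hta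
  | cons c cs ih =>
    simp only [tailAfterLast] at hta
    cases h' : tailAfterLast sep cs with
    | some t2 =>
      rw [h'] at hta
      injection hta with hteq
      subst hteq
      have hmem : sep ∈ cs := by
        by_contra hn
        have hnone := (tailAfterLast_none_iff sep cs).mpr hn
        exact absurd (h'.symm.trans hnone) (by simp)
      rw [List.suffix_cons_iff]
      constructor
      · rintro (heq | hsuf)
        · exfalso
          injection heq with hc1 hc2
          rw [hc2] at htok
          exact htok hmem
        · exact (ih t2 h').mp hsuf
      · intro he; exact Or.inr ((ih t2 h').mpr he)
    | none =>
      rw [h'] at hta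
      split_ifs at hta with hc
      injection hta with hteq
      subst hteq
      have hnm : sep ∉ cs := (tailAfterLast_none_iff sep cs).mp h'
      rw [List.suffix_cons_iff]
      constructor
      · rintro (heq | hsuf)
        · cases heq; rfl
        · exact absurd (hsuf.subset List.mem_cons_self) hnm
      · rintro rfl
        exact Or.inl (by rw [hc])

-- ===== VERDICT (by name: the statement is the Claim_ definition above) =====
theorem label_from_column_py_spec : Claim_equal_label_from_column_py := by
  intro column _
  unfold Spec_label_from_column_py label_from_column_py label_from_column_py_alt
  simp only [aLoop, PySem.Str.endswith_eq, PySem.Str.toList_lower]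
  set L : List Char := PySem.Chars.lower column.toList with hL
  cases hta : tailAfterLast '_' L with
  | none =>
    have hnm : '_' ∉ L := (tailAfterLast_none_iff '_' L).mp hta
    have hne : ∀ tok : List Char, PySem.Chars.endswith L ('_' :: tok) = false := by
      intro tok
      rw [← Bool.not_eq_true, PySem.Chars.endswith_iff]
      intro hsuf; exact hnm (hsuf.subset List.mem_cons_self)
    simp only [pyRsplit1, hta,
      show ("_mps" : String).toList = '_' :: ['m','p','s'] from rfl,
      show ("_m" : String).toList = '_' :: ['m'] from rfl,
      show ("_c" : String).toList = '_' :: ['c'] from rfl,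
      show ("_hpa" : String).toList = '_' :: ['h','p','a'] from rfl,
      show ("_deg" : String).toList = '_' :: ['d','e','g'] from rfl, hne]
    simp
  | some t =>
    have key : ∀ tok : List Char, '_' ∉ tok →
        PySem.Chars.endswith L ('_' :: tok) = decide (tok = t) := by
      intro tok htok
      by_cases h : tok = t
      · subst h
        have he : PySem.Chars.endswith L ('_' :: tok) = true :=
          (PySem.Chars.endswith_iff L ('_' :: tok)).mpr
            ((suffix_iff_tailAfterLast '_' L tok tok hta htok).mpr rfl)
        simp [he]
      · have he : PySem.Chars.endswith L ('_' :: tok) = false := by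
          rw [← Bool.not_eq_true, PySem.Chars.endswith_iff]
          exact fun hs => h ((suffix_iff_tailAfterLast '_' L t tok hta htok).mp hs)
        simp [he, h]
    simp only [pyRsplit1, hta,
      show ("_mps" : String).toList = '_' :: ['m','p','s'] from rfl,
      show ("_m" : String).toList = '_' :: ['m'] from rfl,
      show ("_c" : String).toList = '_' :: ['c'] from rfl,
      show ("_hpa" : String).toList = '_' :: ['h','p','a'] from rfl,
      show ("_deg" : String).toList = '_' :: ['d','e','g'] from rfl]
    rw [key ['m','p','s'] (by decide), key ['m'] (by decide), key ['c'] (by decide),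
        key ['h','p','a'] (by decide), key ['d','e','g'] (by decide)]
    by_cases h1 : ['m','p','s'] = t
    · subst h1
      simp [show String.ofList ['m','p','s'] = "mps" from rfl,
        show (PySem.Dict.ofList [("mps", "m/s"), ("m", "m"), ("c", "C"), ("hpa", "hPa"), ("deg", "deg")]).get? "mps" = some "m/s" from rfl]
    by_cases h2 : ['m'] = t
    · subst h2
      simp [show String.ofList ['m'] = "m" from rfl,
        show (PySem.Dict.ofList [("mps", "m/s"), ("m", "m"), ("c", "C"), ("hpa", "hPa"), ("deg", "deg")]).get? "m" = some "m" from rfl, h1]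
    by_cases h3 : ['c'] = t
    · subst h3
      simp [show String.ofList ['c'] = "c" from rfl,
        show (PySem.Dict.ofList [("mps", "m/s"), ("m", "m"), ("c", "C"), ("hpa", "hPa"), ("deg", "deg")]).get? "c" = some "C" from rfl, h1, h2]
    by_cases h4 : ['h','p','a'] = t
    · subst h4
      simp [show String.ofList ['h','p','a'] = "hpa" from rfl,
        show (PySem.Dict.ofList [("mps", "m/s"), ("m", "m"), ("c", "C"), ("hpa", "hPa"), ("deg", "deg")]).get? "hpa" = some "hPa" from rfl, h1, h2, h3]
    by_cases h5 : ['d','e','g'] = t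
    · subst h5
      simp [show String.ofList ['d','e','g'] = "deg" from rfl,
        show (PySem.Dict.ofList [("mps", "m/s"), ("m", "m"), ("c", "C"), ("hpa", "hPa"), ("deg", "deg")]).get? "deg" = some "deg" from rfl, h1, h2, h3, h4]
    · have hs1 : (("mps" : String) == String.ofList t) = false := by
        simp only [beq_eq_false_iff_ne, ne_eq]
        exact fun hh => h1 (by simpa using congrArg String.toList hh)
      have hs2 : (("m" : String) == String.ofList t) = false := by
        simp only [beq_eq_false_iff_ne, ne_eq]
        exact fun hh => h2 (by simpa using congrArg String.toList hh)
      have hs3 : (("c" : String) == String.ofList t) = false := by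
        simp only [beq_eq_false_iff_ne, ne_eq]
        exact fun hh => h3 (by simpa using congrArg String.toList hh)
      have hs4 : (("hpa" : String) == String.ofList t) = false := by
        simp only [beq_eq_false_iff_ne, ne_eq]
        exact fun hh => h4 (by simpa using congrArg String.toList hh)
      have hs5 : (("deg" : String) == String.ofList t) = false := by
        simp only [beq_eq_false_iff_ne, ne_eq]
        exact fun hh => h5 (by simpa using congrArg String.toList hh)
      have hofl : PySem.Dict.ofList [("mps", "m/s"), ("m", "m"), ("c", "C"), ("hpa", "hPa"), ("deg", "deg")]
          = PySem.Dict.mk [("mps", "m/s"), ("m", "m"), ("c", "C"), ("hpa", "hPa"), ("deg", "deg")] := rfl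
      simp [hofl, PySem.Dict.get?_mk_cons, hs1, hs2, hs3, hs4, hs5, h1, h2, h3, h4, h5,
        show ∀ x : String, (PySem.Dict.mk ([] : List (String × String))).get? x = none from fun _ => rfl]
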